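-- pv_equiv track=rewrite | github.com/edder773/Algorithm | Python/SWEA/베이비진 게임(★).py | check
-- ===== SOURCE A (Python) =====
-- def check(card,win): # 베이비 진 체크
--     cnt = 0
--     for num in card:
--         if num: # 만약 카운팅 배열에 숫자가 들어있으면
--             cnt += 1 # 횟수 증가
--         else: # 없으면
--             cnt = 0 # 초기화
--         if cnt == 3 or num == 3: # 연속된 숫가거나 같은 숫자 3개면
--             return win # 이겼다
--     return 0
-- ===== SOURCE B (Python) =====
-- def check(card, win):
--     has_triple = any(c == 3 for c in card)
--     has_run = any(a != 0 and b != 0 and c != 0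
--                   for a, b, c in zip(card, card[1:], card[2:]))
--     return win if has_triple or has_run else 0
-- ===== Notes on version B (the rewrite author's own statement) =====
-- stated objective: simpler
-- what changed: B replaces A's single stateful pass (a consecutive-nonzero counter with early return) by a pure predicate: one scan for an exact count of 3 and one window scan over zipped shifted lists for three consecutive nonzero counts.
import Mathlib
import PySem

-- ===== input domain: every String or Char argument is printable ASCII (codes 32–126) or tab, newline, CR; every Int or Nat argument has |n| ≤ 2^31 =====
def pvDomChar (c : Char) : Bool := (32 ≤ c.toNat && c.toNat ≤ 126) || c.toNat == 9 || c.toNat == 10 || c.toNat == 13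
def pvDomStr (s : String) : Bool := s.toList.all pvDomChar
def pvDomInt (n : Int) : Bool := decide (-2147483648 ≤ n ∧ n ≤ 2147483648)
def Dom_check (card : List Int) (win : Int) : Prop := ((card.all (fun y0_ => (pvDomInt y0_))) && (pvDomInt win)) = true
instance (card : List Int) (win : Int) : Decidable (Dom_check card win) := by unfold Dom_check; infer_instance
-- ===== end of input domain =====

-- B recomputes A's result as a pure predicate (exact-3 scan + zipped-window scan) instead of A's stateful counter pass; objective: simpler.


-- ===== PORT A =====
-- the for-loop with its running counter `cnt` and early return
def checkLoop (card : List Int) (cnt : Int) (win : Int) : Int :=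
  match card with
  | [] => 0
  | num :: rest =>
    let cnt' : Int := if num ≠ 0 then cnt + 1 else 0   -- `if num:` — Python truthiness
    if cnt' = 3 ∨ num = 3 then win else checkLoop rest cnt' win

def check (card : List Int) (win : Int) : Int := checkLoop card 0 win

-- ===== PORT B =====
-- zip(card, card[1:], card[2:]): card[i:] on a nonnegative index is List.drop i
def check_alt (card : List Int) (win : Int) : Int :=
  let hasTriple := card.any (fun c => c == 3)
  let hasRun := (card.zip ((card.drop 1).zip (card.drop 2))).any
    (fun t => t.1 != 0 && t.2.1 != 0 && t.2.2 != 0)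
  if hasTriple || hasRun then win else 0

-- ===== PRECONDITION & SPEC =====
def Spec_check (card : List Int) (win : Int) (out : Int) : Prop := out = check_alt card win
instance (card : List Int) (win : Int) (out : Int) : Decidable (Spec_check card win out) := by unfold Spec_check; infer_instance

-- ===== CLAIM (what is proved, stated in full; the proofs are below) =====
def Claim_equal_check : Prop := ∀ (card : List Int) (win : Int), Dom_check card win → Spec_check card win (check card win)

-- ===== LEMMAS AND PROOFS =====

-- `pfxNZ n xs`: xs has at least n elements and its first n elements are all nonzero
def pfxNZ : Nat → List Int → Bool
  | 0, _ => true
  | _ + 1, [] => false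
  | n + 1, x :: xs => (x != 0) && pfxNZ n xs

-- the window scan of B
def winAny (card : List Int) : Bool :=
  (card.zip ((card.drop 1).zip (card.drop 2))).any
    (fun t => t.1 != 0 && t.2.1 != 0 && t.2.2 != 0)

lemma winAny_cons (x : Int) (xs : List Int) :
    winAny (x :: xs) = (((x != 0) && pfxNZ 2 xs) || winAny xs) := by
  match xs with
  | [] => simp [winAny, pfxNZ]
  | [a] => simp [winAny, pfxNZ]
  | a :: b :: t => simp [winAny, pfxNZ, Bool.and_assoc]

lemma pfxNZ_mono {m n : Nat} (h : m ≤ n) (xs : List Int) (hn : pfxNZ n xs = true) :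
    pfxNZ m xs = true := by
  induction xs generalizing m n with
  | nil =>
    cases m with
    | zero => rfl
    | succ m => cases n with
      | zero => omega
      | succ n => simp [pfxNZ] at hn
  | cons x xs ih =>
    cases m with
    | zero => rfl
    | succ m => cases n with
      | zero => omega
      | succ n =>
        simp [pfxNZ] at hn ⊢
        exact ⟨hn.1, ih (by omega) hn.2⟩

lemma pfx3_winAny (xs : List Int) (hp : pfxNZ 3 xs = true) : winAny xs = true := by
  match xs with
  | [] => simp [pfxNZ] at hp
  | [a] => simp [pfxNZ] at hp
  | [a, b] => simp [pfxNZ] at hp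
  | a :: b :: c :: t =>
    simp [pfxNZ] at hp
    simp [winAny, hp.1, hp.2.1, hp.2.2]

lemma checkLoop_eq (card : List Int) (win : Int) (k : Nat) (hk : k ≤ 2) :
    checkLoop card (k : Int) win =
      if (card.any (fun c => c == 3) || pfxNZ (3 - k) card || winAny card) then win else 0 := by
  induction card generalizing k with
  | nil =>
    have h3 : 3 - k = (2 - k) + 1 := by omega
    simp [checkLoop, winAny, h3, pfxNZ]
  | cons num rest ih =>
    by_cases h3 : num = 3
    · simp [checkLoop, h3]
    · by_cases h0 : num = 0
      · subst h0
        have hstep : checkLoop ((0 : Int) :: rest) (k : Int) win = checkLoop rest 0 win := by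
          simp [checkLoop]
        rw [hstep, show (0 : Int) = ((0 : Nat) : Int) from rfl, ih 0 (by omega)]
        have hp : pfxNZ (3 - k) ((0 : Int) :: rest) = false := by
          have h31 : 3 - k = (2 - k) + 1 := by omega
          simp [h31, pfxNZ]
        rw [winAny_cons]
        cases hq : pfxNZ 3 rest
        · simp [hp]
        · have hw := pfx3_winAny rest hq
          simp [hp, hw]
      · -- num ≠ 0, num ≠ 3
        by_cases hk2 : k = 2
        · have hl : checkLoop (num :: rest) (k : Int) win = win := by
            simp [checkLoop, h0, hk2]
          rw [hl]
          have hp : pfxNZ (3 - k) (num :: rest) = true := by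
            subst hk2; simp [pfxNZ, h0]
          simp [hp]
        · have hck : ¬(((k : Int) + 1) = 3 ∨ num = 3) := by
            simp only [not_or]
            exact ⟨by omega, h3⟩
          have hstep : checkLoop (num :: rest) (k : Int) win = checkLoop rest ((k : Int) + 1) win := by
            simp [checkLoop, h0, hck]
          rw [hstep, show ((k : Int) + 1) = ((k + 1 : Nat) : Int) by push_cast; ring,
              ih (k + 1) (by omega)]
          have hsub : 3 - k = (2 - k) + 1 := by omega
          have hsub2 : 3 - (k + 1) = 2 - k := by omega
          rw [winAny_cons, hsub2]
          by_cases hw : pfxNZ 2 rest = true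
          · have h2k : pfxNZ (2 - k) rest = true := pfxNZ_mono (by omega) rest hw
            have hpt : pfxNZ (3 - k) (num :: rest) = true := by
              rw [hsub]; simp [pfxNZ, h0, h2k]
            simp [h2k, hpt]
          · simp only [Bool.not_eq_true] at hw
            have hpf : pfxNZ (3 - k) (num :: rest) = ((num != 0) && pfxNZ (2 - k) rest) := by
              rw [hsub]; simp [pfxNZ]
            simp [hw, hpf, h0, h3]

lemma check_eq_alt (card : List Int) (win : Int) : check card win = check_alt card win := by
  have h := checkLoop_eq card win 0 (by omega)
  simp only [Nat.cast_zero, Nat.sub_zero] at h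
  have halt : check_alt card win =
      if (card.any (fun c => c == 3) || winAny card) then win else 0 := rfl
  show checkLoop card 0 win = check_alt card win
  rw [h, halt]
  cases hp : pfxNZ 3 card
  · simp
  · have hw := pfx3_winAny card hp
    simp [hw]

-- ===== VERDICT (by name: the statement is the Claim_ definition above) =====
theorem check_spec : Claim_equal_check := by
  intro card win _
  unfold Spec_check
  exact check_eq_alt card win
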